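-- pv_equiv track=rewrite | github.com/Forsee41/band-tracker-bot | band_tracker/updater/deserializator.py | image_helper
-- ===== SOURCE A (Python) =====
-- def image_helper(raw_entity: dict, thumbnail: bool = False) -> str | None:
--     if (
--         retina := [
--             image.get("url")
--             for image in raw_entity.get("images", [])
--             if "RETINA_PORTRAIT_3_2" in image.get("url")
--         ]
--     ) and not thumbnail:
--         return retina[0]
--     elif recommend := [
--         image.get("url")
--         for image in raw_entity.get("images", [])
--         if "RECOMENDATION" in image.get("url")
--     ]:
--         return recommend[0]
--     else:
--         return None
-- ===== SOURCE B (Python) =====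
-- def image_helper(raw_entity: dict, thumbnail: bool = False) -> str | None:
--     # Min-by-priority selection: retina (unless thumbnail) has priority 0,
--     # recommendation priority 1; keep the single first-seen best pair.
--     best = None
--     for image in raw_entity.get("images", []):
--         url = image.get("url")
--         if "RETINA_PORTRAIT_3_2" in url and not thumbnail:
--             prio = 0
--         elif "RECOMENDATION" in url:
--             prio = 1
--         else:
--             prio = None
--         if prio is not None and (best is None or prio < best[0]):
--             best = (prio, url)
--     return None if best is None else best[1]
-- ===== Notes on version B (the rewrite author's own statement) =====
-- stated objective: alternative
-- what changed: Replaced A's two full filtered-list comprehensions and branch on their emptiness by a min-by-priority selection: each url gets a priority (retina=0 unless thumbnail, recommendation=1) and a single best (priority, url) pair is maintained, first occurrence kept.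
import Mathlib
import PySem

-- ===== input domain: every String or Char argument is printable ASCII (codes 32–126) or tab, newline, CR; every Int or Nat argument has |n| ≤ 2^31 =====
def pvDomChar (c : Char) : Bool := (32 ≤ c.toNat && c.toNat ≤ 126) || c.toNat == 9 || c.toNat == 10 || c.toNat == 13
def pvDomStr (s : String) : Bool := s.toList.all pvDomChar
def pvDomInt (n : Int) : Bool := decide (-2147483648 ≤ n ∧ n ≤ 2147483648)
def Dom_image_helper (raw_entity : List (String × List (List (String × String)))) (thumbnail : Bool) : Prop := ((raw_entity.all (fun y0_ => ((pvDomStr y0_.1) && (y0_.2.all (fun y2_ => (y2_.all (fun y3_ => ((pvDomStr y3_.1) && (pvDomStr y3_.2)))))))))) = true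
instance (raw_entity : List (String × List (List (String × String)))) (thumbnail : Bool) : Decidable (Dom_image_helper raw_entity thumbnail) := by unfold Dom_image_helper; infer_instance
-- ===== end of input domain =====

-- B replaces A's two filtered-list comprehensions by a min-by-priority selection keeping one best (priority, url) pair; objective: alternative.
-- ===== PORT A =====
-- image.get("url"): under Pre_ the key is present, so the .getD "" default is never used.
def pvUrl (im : List (String × String)) : String :=
  ((PySem.Dict.mk im).get? "url").getD ""

def image_helper (raw_entity : List (String × List (List (String × String)))) (thumbnail : Bool) : Option String :=
  let images := (PySem.Dict.mk raw_entity).getD "images" []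
  let retina := (images.filter (fun im => PySem.Str.isIn "RETINA_PORTRAIT_3_2" (pvUrl im))).map pvUrl
  if retina ≠ [] ∧ thumbnail = false then retina.head?
  else
    let recommend := (images.filter (fun im => PySem.Str.isIn "RECOMENDATION" (pvUrl im))).map pvUrl
    if recommend ≠ [] then recommend.head? else none

-- ===== PORT B =====
def pvStepB (thumbnail : Bool) (best : Option (Nat × String)) (im : List (String × String)) :
    Option (Nat × String) :=
  let url := pvUrl im
  let prio : Option Nat :=
    if PySem.Str.isIn "RETINA_PORTRAIT_3_2" url && !thumbnail then some 0
    else if PySem.Str.isIn "RECOMENDATION" url then some 1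
    else none
  match prio, best with
  | none, _ => best
  | some p, none => some (p, url)
  | some p, some (bp, bu) => if p < bp then some (p, url) else some (bp, bu)

def image_helper_alt (raw_entity : List (String × List (List (String × String)))) (thumbnail : Bool) : Option String :=
  let images := (PySem.Dict.mk raw_entity).getD "images" []
  match images.foldl (pvStepB thumbnail) none with
  | none => none
  | some (_, u) => some u

-- ===== PRECONDITION =====
-- Pre_ excludes inputs where some image dict lacks a "url" key: there image.get("url") is
-- None and the Python 'in' test raises TypeError in both A and B.
def Pre_image_helper (raw_entity : List (String × List (List (String × String)))) (thumbnail : Bool) : Prop :=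
  ∀ im ∈ (PySem.Dict.mk raw_entity).getD "images" [], ((PySem.Dict.mk im).get? "url").isSome = true

instance (raw_entity : List (String × List (List (String × String)))) (thumbnail : Bool) : Decidable (Pre_image_helper raw_entity thumbnail) := by
  unfold Pre_image_helper; infer_instance

def pvWitness_image_helper : (List (String × List (List (String × String)))) × Bool :=
  ([("images", [[("url", "aRETINA_PORTRAIT_3_2b")], [("url", "xRECOMENDATIONy")]])], false)

-- ===== PRECONDITION & SPEC =====
def Spec_image_helper (raw_entity : List (String × List (List (String × String)))) (thumbnail : Bool) (out : Option String) : Prop := out = image_helper_alt raw_entity thumbnail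
instance (raw_entity : List (String × List (List (String × String)))) (thumbnail : Bool) (out : Option String) : Decidable (Spec_image_helper raw_entity thumbnail out) := by unfold Spec_image_helper; infer_instance

-- ===== CLAIM =====
def Claim_equal_image_helper : Prop := ∀ (raw_entity : List (String × List (List (String × String)))) (thumbnail : Bool), Dom_image_helper raw_entity thumbnail → Pre_image_helper raw_entity thumbnail → Spec_image_helper raw_entity thumbnail (image_helper raw_entity thumbnail)

-- ===== LEMMAS AND PROOFS =====
-- retCond/recCond: the two prio conditions of pvStepB.
def retCond (th : Bool) (im : List (String × String)) : Bool :=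
  PySem.Str.isIn "RETINA_PORTRAIT_3_2" (pvUrl im) && !th

def recCond (th : Bool) (im : List (String × String)) : Bool :=
  !(retCond th im) && PySem.Str.isIn "RECOMENDATION" (pvUrl im)

lemma step_ret (th : Bool) (im : List (String × String)) (best : Option (Nat × String))
    (h : retCond th im = true) :
    pvStepB th best im =
      match best with
      | none => some (0, pvUrl im)
      | some (bp, bu) => if 0 < bp then some (0, pvUrl im) else some (bp, bu) := by
  simp only [retCond] at h
  simp only [pvStepB, h]
  cases best <;> rfl

lemma step_rec (th : Bool) (im : List (String × String)) (best : Option (Nat × String))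
    (h : recCond th im = true) :
    pvStepB th best im =
      match best with
      | none => some (1, pvUrl im)
      | some (bp, bu) => if 1 < bp then some (1, pvUrl im) else some (bp, bu) := by
  simp only [recCond, retCond, Bool.and_eq_true, Bool.not_eq_true'] at h
  simp only [pvStepB, h.1, h.2]
  cases best <;> rfl

lemma step_none (th : Bool) (im : List (String × String)) (best : Option (Nat × String))
    (hr : retCond th im = false) (hc : recCond th im = false) :
    pvStepB th best im = best := by
  simp only [recCond, hr, Bool.not_false, Bool.true_and] at hc
  simp only [retCond] at hr
  simp only [pvStepB, hr, hc]
  simp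

lemma fold_abs0 (th : Bool) (u : String) (images : List (List (String × String))) :
    images.foldl (pvStepB th) (some (0, u)) = some (0, u) := by
  induction images with
  | nil => rfl
  | cons im rest ih =>
    simp only [List.foldl_cons]
    by_cases hR : retCond th im = true
    · rw [step_ret th im _ hR]; simpa using ih
    · by_cases hC : recCond th im = true
      · rw [step_rec th im _ hC]; simpa using ih
      · rw [step_none th im _ (by simpa using hR) (by simpa using hC)]; exact ih

lemma fold_from1 (th : Bool) (u : String) (images : List (List (String × String))) :
    images.foldl (pvStepB th) (some (1, u)) =
      match (images.filter (retCond th)).map pvUrl with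
      | v :: _ => some (0, v)
      | [] => some (1, u) := by
  induction images with
  | nil => rfl
  | cons im rest ih =>
    simp only [List.foldl_cons, List.filter_cons]
    by_cases hR : retCond th im = true
    · rw [step_ret th im _ hR, hR]
      simpa using fold_abs0 th (pvUrl im) rest
    · have hR' : retCond th im = false := by simpa using hR
      by_cases hC : recCond th im = true
      · rw [step_rec th im _ hC, hR']
        simpa using ih
      · rw [step_none th im _ hR' (by simpa using hC), hR']
        exact ih

lemma fold_from_none (th : Bool) (images : List (List (String × String))) :
    images.foldl (pvStepB th) none =
      match (images.filter (retCond th)).map pvUrl with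
      | v :: _ => some (0, v)
      | [] =>
        match (images.filter (recCond th)).map pvUrl with
        | v :: _ => some (1, v)
        | [] => none := by
  induction images with
  | nil => rfl
  | cons im rest ih =>
    simp only [List.foldl_cons, List.filter_cons]
    by_cases hR : retCond th im = true
    · rw [step_ret th im _ hR, hR]
      simpa using fold_abs0 th (pvUrl im) rest
    · have hR' : retCond th im = false := by simpa using hR
      by_cases hC : recCond th im = true
      · rw [step_rec th im _ hC, hR', hC]
        simpa using fold_from1 th (pvUrl im) rest
      · have hC' : recCond th im = false := by simpa using hC
        rw [step_none th im _ hR' hC', hR', hC']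
        exact ih

-- when no element satisfies retCond, the recCond filter is the plain RECOMENDATION filter
lemma filter_rec_of_no_ret (th : Bool) (images : List (List (String × String)))
    (h : images.filter (retCond th) = []) :
    images.filter (recCond th) =
      images.filter (fun im => PySem.Str.isIn "RECOMENDATION" (pvUrl im)) := by
  rw [List.filter_eq_nil_iff] at h
  apply List.filter_congr
  intro im him
  have := h im him
  simp only [Bool.not_eq_true] at this
  simp [recCond, this]

-- ===== VERDICT =====
theorem image_helper_spec : Claim_equal_image_helper := by
  intro raw_entity thumbnail _ _
  unfold Spec_image_helper image_helper image_helper_alt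
  simp only [fold_from_none]
  cases thumbnail with
  | false =>
    have hret : retCond false = fun im => PySem.Str.isIn "RETINA_PORTRAIT_3_2" (pvUrl im) := by
      funext im; simp [retCond]
    rw [hret]
    cases hf : ((PySem.Dict.mk raw_entity).getD "images" []).filter
        (fun im => PySem.Str.isIn "RETINA_PORTRAIT_3_2" (pvUrl im)) with
    | cons a l => simp
    | nil =>
      have hrec := filter_rec_of_no_ret false ((PySem.Dict.mk raw_entity).getD "images" [])
        (by rw [hret]; exact hf)
      rw [hrec]
      cases hg : ((PySem.Dict.mk raw_entity).getD "images" []).filter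
          (fun im => PySem.Str.isIn "RECOMENDATION" (pvUrl im)) with
      | nil => simp
      | cons a l => simp
  | true =>
    have hret : (((PySem.Dict.mk raw_entity).getD "images" []).filter (retCond true)) = [] := by
      simp [retCond]
    have hrec := filter_rec_of_no_ret true ((PySem.Dict.mk raw_entity).getD "images" []) hret
    rw [hret, hrec]
    cases hg : ((PySem.Dict.mk raw_entity).getD "images" []).filter
        (fun im => PySem.Str.isIn "RECOMENDATION" (pvUrl im)) with
    | nil => simp
    | cons a l => simp
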